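-- pv_equiv track=rewrite | github.com/sooo19/coding-test-study | [python] 프로그래머스/[해시]포켓몬-시간초과.py | solution
-- ===== SOURCE A (Python) =====
-- from itertools import combinations
-- from itertools import combinations
--
-- def solution(nums):
--     comb = list(combinations(nums, len(nums)//2))
--
--     lens = []
--     for arr in comb:
--         alist = []
--         for i in range(len(arr)):
--             if arr[i] not in alist:
--                 alist.append(arr[i])
--         lens.append(len(alist))
--
--     answer = max(lens)
--
--     return answer
-- ===== SOURCE B (Python) =====
-- def solution(nums):
--     # The best size-N/2 pick has min(N//2, number of distinct values) distinct elements.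
--     return min(len(nums) // 2, len(set(nums)))
-- ===== Notes on version B (the rewrite author's own statement) =====
-- stated objective: faster
-- what changed: Replaces the enumeration of all C(n,n/2) combinations with their per-combination distinct-count scans by the closed form min(n//2, len(set(nums))).
import Mathlib
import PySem

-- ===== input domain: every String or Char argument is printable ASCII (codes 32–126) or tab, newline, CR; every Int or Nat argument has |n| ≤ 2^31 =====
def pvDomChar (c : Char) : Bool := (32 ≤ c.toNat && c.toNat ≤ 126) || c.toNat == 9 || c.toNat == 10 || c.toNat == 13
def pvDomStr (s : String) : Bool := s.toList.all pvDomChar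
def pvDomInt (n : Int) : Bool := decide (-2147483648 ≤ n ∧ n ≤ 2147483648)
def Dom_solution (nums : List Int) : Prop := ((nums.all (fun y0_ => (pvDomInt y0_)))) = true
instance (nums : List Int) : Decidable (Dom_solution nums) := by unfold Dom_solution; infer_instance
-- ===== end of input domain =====

-- B replaces A's enumeration of all C(n,n/2) combinations (each scanned for distinct
-- elements) by the closed form min(n//2, len(set(nums))); proved equal for every input.

-- ===== PORT A =====
-- literal port of A: build all combinations of size len(nums)//2, for each count
-- distinct elements with the hand-rolled "alist" loop, return max of the counts.
-- (Python's max(lens) raises only on an empty list; lens is provably nonempty here,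
-- so the none branch of max? is unreachable.)
def solution (nums : List Int) : Int :=
  let comb := PySem.List.combinations nums (nums.length / 2)
  let lens := comb.foldl (fun lens arr =>
    lens ++ [(Int.ofNat ((arr.foldl (fun alist x =>
        if alist.contains x then alist else alist ++ [x]) ([] : List Int)).length))]) []
  match PySem.List.max? lens (fun x => x) with
  | some m => m
  | none => 0

-- ===== PORT B =====
def solution_alt (nums : List Int) : Int :=
  min (Int.ofNat (nums.length / 2)) (PySem.Set.len (PySem.Set.ofList nums))

-- ===== PRECONDITION & SPEC =====
def Spec_solution (nums : List Int) (out : Int) : Prop := out = solution_alt nums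
instance (nums : List Int) (out : Int) : Decidable (Spec_solution nums out) := by unfold Spec_solution; infer_instance

-- ===== CLAIM (what is proved, stated in full; the proofs are below) =====
def Claim_equal_solution : Prop := ∀ (nums : List Int), Dom_solution nums → Spec_solution nums (solution nums)

-- ===== LEMMAS AND PROOFS =====

-- A's inner "alist" loop is exactly set-of-list construction.
theorem alist_loop_eq_ofList (arr : List Int) :
    arr.foldl (fun alist x => if alist.contains x then alist else alist ++ [x]) ([] : List Int)
      = PySem.Set.ofList arr := by
  rw [PySem.Set.ofList_eq_foldl]
  rfl

-- a fold of Set.add over xs only appends a sublist of xs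
theorem foldl_add_sublist (xs : List Int) (acc : List Int) :
    ∃ t, xs.foldl PySem.Set.add acc = acc ++ t ∧ t.Sublist xs := by
  induction xs generalizing acc with
  | nil => exact ⟨[], by simp⟩
  | cons x xs ih =>
    simp only [List.foldl_cons]
    by_cases hx : x ∈ acc
    · rw [PySem.Set.add_of_mem hx]
      rcases ih acc with ⟨t, ht, hsub⟩
      exact ⟨t, ht, hsub.cons x⟩
    · rw [PySem.Set.add_of_not_mem hx]
      rcases ih (acc ++ [x]) with ⟨t, ht, hsub⟩
      exact ⟨x :: t, by rw [ht]; simp, hsub.cons₂ x⟩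

theorem ofList_sublist (xs : List Int) : (PySem.Set.ofList xs).Sublist xs := by
  rw [PySem.Set.ofList_eq_foldl]
  rcases foldl_add_sublist xs [] with ⟨t, ht, hsub⟩
  simpa [ht] using hsub

-- a sublist chain can be completed to any intermediate length
theorem exists_intermediate_sublist (l₁ l₂ : List Int) (h : l₁.Sublist l₂) :
    ∀ m, l₁.length ≤ m → m ≤ l₂.length →
      ∃ t : List Int, l₁.Sublist t ∧ t.Sublist l₂ ∧ t.length = m := by
  induction h with
  | slnil => intro m h1 h2; exact ⟨[], by simpa using Nat.le_antisymm h2 (Nat.zero_le m) ▸ by simp⟩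
  | @cons l₁ l₂ a h ih =>
    intro m h1 h2
    by_cases hm : m ≤ l₂.length
    · rcases ih m h1 hm with ⟨t, ht1, ht2, ht3⟩
      exact ⟨t, ht1, ht2.cons a, ht3⟩
    · have hm' : m = l₂.length + 1 := by simp at h2 hm; omega
      have hl : l₁.length ≤ l₂.length := h.length_le
      rcases ih l₂.length hl le_rfl with ⟨t, ht1, ht2, ht3⟩
      exact ⟨a :: t, ht1.cons a, ht2.cons₂ a, by simp [ht3, hm']⟩
  | @cons₂ l₁ l₂ a h ih =>
    intro m h1 h2
    have h1' : l₁.length ≤ m - 1 := by simp at h1; omega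
    have h2' : m - 1 ≤ l₂.length := by simp at h2; omega
    rcases ih (m - 1) h1' h2' with ⟨t, ht1, ht2, ht3⟩
    refine ⟨a :: t, ht1.cons₂ a, ht2.cons₂ a, ?_⟩
    simp only [List.length_cons, ht3]
    simp at h1; omega

-- upper bound: any combination of size k has at most min k d distinct elements
theorem distinct_le (nums c : List Int) (hc : c.Sublist nums) :
    (PySem.Set.ofList c).length ≤ (PySem.Set.ofList nums).length := by
  have hnd : (PySem.Set.ofList c).Nodup := PySem.Set.nodup_ofList c
  have hsub : (PySem.Set.ofList c) ⊆ (PySem.Set.ofList nums) := by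
    intro x hx
    rw [PySem.Set.mem_ofList] at hx ⊢
    exact hc.subset hx
  exact (List.subperm_of_subset hnd hsub).length_le

-- existence: some combination of size k = n/2 attains min k d distinct elements
theorem exists_best (nums : List Int) :
    ∃ c, c ∈ PySem.List.combinations nums (nums.length / 2) ∧
      (PySem.Set.ofList c).length = min (nums.length / 2) (PySem.Set.ofList nums).length := by
  set k := nums.length / 2 with hk
  set d := (PySem.Set.ofList nums).length with hd
  have hkn : k ≤ nums.length := Nat.div_le_self _ _
  by_cases hcase : k ≤ d
  · -- take the first k distinct values
    refine ⟨(PySem.Set.ofList nums).take k, ?_, ?_⟩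
    · rw [PySem.List.mem_combinations_iff]
      exact ⟨(List.take_sublist _ _).trans (ofList_sublist nums), by simp; omega⟩
    · have hnd : ((PySem.Set.ofList nums).take k).Nodup :=
        (List.take_sublist _ _).nodup (PySem.Set.nodup_ofList nums)
      rw [PySem.Set.ofList_eq_self_of_nodup _ hnd]
      simp [List.length_take]; omega
  · -- complete set(nums) to a sublist of length k
    rw [Nat.not_le] at hcase
    rcases exists_intermediate_sublist _ _ (ofList_sublist nums) k (le_of_lt hcase) hkn with
      ⟨t, ht1, ht2, ht3⟩
    refine ⟨t, ?_, ?_⟩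
    · rw [PySem.List.mem_combinations_iff]; exact ⟨ht2, ht3⟩
    · have hmem : ∀ x, x ∈ PySem.Set.ofList t ↔ x ∈ PySem.Set.ofList nums := by
        intro x
        rw [PySem.Set.mem_ofList, PySem.Set.mem_ofList]
        exact ⟨fun hx => ht2.subset hx,
          fun hx => ht1.subset ((PySem.Set.mem_ofList nums x).mpr hx)⟩
      have hperm := (List.perm_ext_iff_of_nodup (PySem.Set.nodup_ofList t)
        (PySem.Set.nodup_ofList nums)).mpr hmem
      rw [hperm.length_eq, ← hd]
      omega

-- ===== VERDICT (by name: the statement is the Claim_ definition above) =====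
theorem solution_spec : Claim_equal_solution := by
  intro nums _
  unfold Spec_solution solution solution_alt
  simp only [alist_loop_eq_ofList, PySem.List.foldl_append_singleton_eq_map, List.nil_append]
  set k := nums.length / 2 with hk
  set comb := PySem.List.combinations nums k with hcomb
  set f : List Int → Int := fun arr => Int.ofNat (PySem.Set.ofList arr).length with hf
  set d := (PySem.Set.ofList nums).length with hd
  have hbest := exists_best nums
  rw [← hk, ← hcomb, ← hd] at hbest
  rcases hbest with ⟨c, hcmem, hcval⟩
  have hMmem : Int.ofNat (min k d) ∈ comb.map f := by
    refine List.mem_map.mpr ⟨c, hcmem, ?_⟩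
    simp [hf, hcval]
  have hne : comb.map f ≠ [] := by
    intro h; rw [h] at hMmem; exact (List.not_mem_nil) hMmem
  rcases hm : PySem.List.max? (comb.map f) (fun x => x) with _ | m
  · exact absurd ((PySem.List.max?_eq_none_iff _ _).mp hm) hne
  have hmM : m ≤ Int.ofNat (min k d) := by
    rcases List.mem_map.mp (PySem.List.max?_mem hm) with ⟨c', hc'mem, hc'val⟩
    rw [PySem.List.mem_combinations_iff] at hc'mem
    have h1 : (PySem.Set.ofList c').length ≤ d := distinct_le nums c' hc'mem.1
    have h2 : (PySem.Set.ofList c').length ≤ k := by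
      calc (PySem.Set.ofList c').length ≤ c'.length := PySem.Set.length_ofList_le c'
        _ = k := hc'mem.2
    rw [← hc'val]
    simp [hf]; omega
  have hMm : Int.ofNat (min k d) ≤ m := PySem.List.max?_isMax hm _ hMmem
  have : m = Int.ofNat (min k d) := le_antisymm hmM hMm
  rw [this]
  simp [PySem.Set.len, Nat.cast_min]
  rw [← hd]
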